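-- pv_equiv track=rewrite | github.com/pinkycatt/sourcecode | com/prestonsproductions/sourcecode/BoxFactory2018/BoxFactory2018A.py | getMaterialPercentage
-- ===== SOURCE A (Python) =====
-- def getMaterialPercentage(boxes):
--     c = 0
--     p = 0
--     m = 0
--     for box in boxes:
--         if box < 400: c += 1
--         elif box >= 400 and box < 900: p += 1
--         elif box >= 900: m += 1
--
--     c = int(c / len(boxes) * 100)
--     p = int(p / len(boxes) * 100)
--     m = int(m / len(boxes) * 100)
--
--     return (c,p,m)
-- ===== SOURCE B (Python) =====
-- def getMaterialPercentage(boxes):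
--     # sort once, then locate the two thresholds by binary search
--     s = sorted(boxes)
--
--     def bisect_left(a, v):
--         lo, hi = 0, len(a)
--         while lo < hi:
--             mid = (lo + hi) // 2
--             if a[mid] < v:
--                 lo = mid + 1
--             else:
--                 hi = mid
--         return lo
--
--     c = bisect_left(s, 400)
--     pc = bisect_left(s, 900)
--     p = pc - c
--     m = len(boxes) - pc
--     return (int(c / len(boxes) * 100),
--             int(p / len(boxes) * 100),
--             int(m / len(boxes) * 100))
-- ===== Notes on version B (the rewrite author's own statement) =====
-- stated objective: alternative
-- what changed: Replaces the single three-way counting loop by sort-then-binary-search: B sorts the list once and finds the thresholds 400 and 900 with a hand-written bisect_left, deriving the three bucket counts from the two insertion points before applying the identical int(x/len*100) conversion.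
import Mathlib
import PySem

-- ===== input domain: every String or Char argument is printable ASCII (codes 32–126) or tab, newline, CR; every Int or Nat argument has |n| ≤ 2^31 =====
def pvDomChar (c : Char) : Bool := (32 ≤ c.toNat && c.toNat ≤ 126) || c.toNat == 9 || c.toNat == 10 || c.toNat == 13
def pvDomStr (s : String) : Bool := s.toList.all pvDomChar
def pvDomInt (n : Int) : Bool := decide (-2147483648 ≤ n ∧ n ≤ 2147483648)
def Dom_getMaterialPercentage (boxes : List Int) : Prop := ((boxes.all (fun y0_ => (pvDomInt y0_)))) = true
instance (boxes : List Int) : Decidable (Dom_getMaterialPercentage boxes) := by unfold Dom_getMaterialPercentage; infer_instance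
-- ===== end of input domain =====

-- B replaces A's single counting loop by sort + binary search on the two thresholds (objective: alternative).
-- Both Pythons compute int(x / len(boxes) * 100) in IEEE-double arithmetic; each port carries ITS OWN exact
-- integer model of that expression (round-to-nearest-even to 53 bits on the division, a second rounding on
-- the multiplication by 100, truncation): pvPct on the A side, pvPct2 on the B side. Both are exact for the
-- integer counters 0 ≤ c ≤ n the ports feed them.

-- ===== PORT A =====

-- round-to-nearest-even of a/b (b > 0): the correctly rounded quotient used by Python's int/int true division
def pvRneDiv (a b : Nat) : Nat :=
  let q := a / b; let r := a % b
  if 2 * r > b then q + 1 else if 2 * r < b then q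
  else if q % 2 = 0 then q else q + 1

-- round-to-nearest-even of x / 2^k
def pvRneShift (x k : Nat) : Nat :=
  if k = 0 then x else
  let q := x / 2 ^ k; let r := x % 2 ^ k; let h := 2 ^ (k - 1)
  if r > h then q + 1 else if r < h then q
  else if q % 2 = 0 then q else q + 1

-- least d with c * 2^d ≥ n (c ≥ 1): binary exponent of c/n is -d when c ≤ n
def pvFindD (c n : Nat) : Nat :=
  if h : c = 0 ∨ n ≤ c then 0 else 1 + pvFindD (2 * c) n
termination_by n - c
decreasing_by omega

-- exact model of A's  int(c / n * 100)  for integer counters 0 ≤ c ≤ n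
def pvPct (c n : Int) : Int :=
  let c' := c.toNat; let n' := n.toNat
  if c' = 0 then 0 else
  let d := pvFindD c' n'
  let m1 := pvRneDiv (c' * 2 ^ (52 + d)) n'     -- double of c/n = m1 * 2^(-(52+d))
  let x := m1 * 100
  let L := Nat.log2 x + 1                        -- bit length of x
  let m2 := pvRneShift x (L - 53)                -- double of (c/n)*100 = m2 * 2^(L-53-(52+d))
  let e : Int := (L : Int) - 53 - 52 - (d : Int)
  if 0 ≤ e then (m2 : Int) * 2 ^ e.toNat else ((m2 / 2 ^ (-e).toNat : Nat) : Int)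

def getMaterialPercentage (boxes : List Int) : Int × Int × Int :=
  let st := boxes.foldl (fun (s : Int × Int × Int) box =>
    if box < 400 then (s.1 + 1, s.2.1, s.2.2)
    else if 400 ≤ box ∧ box < 900 then (s.1, s.2.1 + 1, s.2.2)
    else if 900 ≤ box then (s.1, s.2.1, s.2.2 + 1)
    else s) (0, 0, 0)
  let n : Int := (boxes.length : Int)
  (pvPct st.1 n, pvPct st.2.1 n, pvPct st.2.2 n)

-- ===== PORT B =====

-- hand-written bisect_left from Source B; the index a[mid] is in range whenever hi ≤ a.length (loop invariant),
-- so getD's default is never consulted on the ports' calls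
def pvBl (a : List Int) (v : Int) (lo hi : Nat) : Nat :=
  if h : lo < hi then
    let mid := (lo + hi) / 2
    if a.getD mid 0 < v then pvBl a v (mid + 1) hi else pvBl a v lo mid
  else lo
termination_by hi - lo
decreasing_by all_goals omega

-- B side's rounding primitive: round-half-up via (2a+b)/(2b), then the tie corrected down to even
def pvRne2 (a b : Nat) : Nat :=
  let q := (2 * a + b) / (2 * b)
  if 2 * (a % b) = b ∧ q % 2 = 1 then q - 1 else q

-- exact model of B's  int(x / n * 100): exponents tracked through bit lengths instead of a search loop
def pvPct2 (c n : Int) : Int :=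
  let cn := c.toNat; let nn := n.toNat
  if cn = 0 then 0 else
  let bc := Nat.log2 cn + 1
  let bn := Nat.log2 nn + 1
  let d := if nn ≤ cn * 2 ^ (bn - bc) then bn - bc else bn - bc + 1
  let m1 := pvRne2 (cn * 2 ^ (52 + d)) nn        -- double of c/n = m1 * 2^(-(52+d))
  let x := m1 * 100
  let L := Nat.log2 x + 1
  let m2 := pvRne2 x (2 ^ (L - 53))              -- double of (c/n)*100 = m2 * 2^(L-53-(52+d))
  if 105 + d ≤ L then ((m2 * 2 ^ (L - 105 - d) : Nat) : Int)
  else ((m2 / 2 ^ (105 + d - L) : Nat) : Int)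

def getMaterialPercentage_alt (boxes : List Int) : Int × Int × Int :=
  let s := PySem.List.sorted boxes (fun x => x) false
  let c : Int := (pvBl s 400 0 s.length : Int)
  let pc : Int := (pvBl s 900 0 s.length : Int)
  let p : Int := pc - c
  let m : Int := (boxes.length : Int) - pc
  let n : Int := (boxes.length : Int)
  (pvPct2 c n, pvPct2 p n, pvPct2 m n)

-- ===== PRECONDITION & SPEC =====
-- Pre_ excludes only the empty list, on which both Pythons raise ZeroDivisionError.
def Pre_getMaterialPercentage (boxes : List Int) : Prop := boxes ≠ []
instance (boxes : List Int) : Decidable (Pre_getMaterialPercentage boxes) := by unfold Pre_getMaterialPercentage; infer_instance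
def pvWitness_getMaterialPercentage : List Int := [100, 400, 900, 1200]

def Spec_getMaterialPercentage (boxes : List Int) (out : Int × Int × Int) : Prop := out = getMaterialPercentage_alt boxes
instance (boxes : List Int) (out : Int × Int × Int) : Decidable (Spec_getMaterialPercentage boxes out) := by unfold Spec_getMaterialPercentage; infer_instance

-- ===== CLAIM (what is proved, stated in full; the proofs are below) =====
def Claim_equal_getMaterialPercentage : Prop := ∀ (boxes : List Int), Dom_getMaterialPercentage boxes → Pre_getMaterialPercentage boxes → Spec_getMaterialPercentage boxes (getMaterialPercentage boxes)

-- ===== LEMMAS AND PROOFS =====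

-- A's fold computes the three bucket counts
theorem pvFoldA (boxes : List Int) (c p m : Int) :
    boxes.foldl (fun (s : Int × Int × Int) box =>
      if box < 400 then (s.1 + 1, s.2.1, s.2.2)
      else if 400 ≤ box ∧ box < 900 then (s.1, s.2.1 + 1, s.2.2)
      else if 900 ≤ box then (s.1, s.2.1, s.2.2 + 1)
      else s) (c, p, m)
    = (c + (boxes.countP (fun b => decide (b < 400)) : Int),
       p + (boxes.countP (fun b => decide (400 ≤ b ∧ b < 900)) : Int),
       m + (boxes.countP (fun b => decide (900 ≤ b)) : Int)) := by
  induction boxes generalizing c p m with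
  | nil => simp
  | cons a t ih =>
    simp only [List.foldl_cons, List.countP_cons]
    by_cases h1 : a < 400
    · have h2 : ¬ (400 ≤ a ∧ a < 900) := by omega
      have h3 : ¬ (900 ≤ a) := by omega
      simp only [if_pos h1, ih]
      simp [h1, h2, h3]
      omega
    · by_cases h2 : 400 ≤ a ∧ a < 900
      · have h3 : ¬ (900 ≤ a) := by omega
        simp only [if_neg h1, if_pos h2, ih]
        simp [h1, h2, h3]
        omega
      · have h3 : 900 ≤ a := by omega
        simp only [if_neg h1, if_neg h2, if_pos h3, ih]
        simp [h1, h2, h3]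
        omega

-- in a ≤-sorted list, the elements < v are exactly the first countP (· < v) positions
theorem pvSortedLtIff (s : List Int) (v : Int) (hs : List.Pairwise (· ≤ ·) s) :
    ∀ i, i < s.length → (s.getD i 0 < v ↔ i < s.countP (fun b => decide (b < v))) := by
  induction s with
  | nil => intro i hi; simp at hi
  | cons a t ih =>
    rcases List.pairwise_cons.mp hs with ⟨ha, ht⟩
    intro i hi
    by_cases hav : a < v
    · cases i with
      | zero =>
        rw [List.getD_cons_zero, List.countP_cons]
        simp [hav]
      | succ j =>
        have hj : j < t.length := by simpa using hi
        have hiff := ih ht j hj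
        rw [List.getD_cons_succ, List.countP_cons, hiff]
        simp [hav]
    · have ht0 : t.countP (fun b => decide (b < v)) = 0 := by
        rw [List.countP_eq_zero]
        intro b hb
        have : a ≤ b := ha b hb
        simp; omega
      cases i with
      | zero =>
        rw [List.getD_cons_zero, List.countP_cons, ht0]
        simp [hav]
      | succ j =>
        have hj : j < t.length := by simpa using hi
        have hmem : t.getD j 0 ∈ t := by
          rw [List.getD_eq_getElem t 0 hj]; exact List.getElem_mem hj
        have hge : a ≤ t.getD j 0 := ha _ hmem
        rw [List.getD_cons_succ, List.countP_cons, ht0]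
        have hd : (decide (a < v)) = false := by simp [hav]
        rw [hd]
        simp only [Bool.false_eq_true, if_false]
        omega

-- binary-search invariant: if positions < k are exactly those holding elements < v, pvBl finds k
theorem pvBlEq (s : List Int) (v : Int) (k : Nat)
    (hk : ∀ i, i < s.length → (s.getD i 0 < v ↔ i < k)) :
    ∀ lo hi, lo ≤ k → k ≤ hi → hi ≤ s.length → pvBl s v lo hi = k := by
  intro lo hi
  induction lo, hi using pvBl.induct s v with
  | case1 lo hi h mid hlt ih =>
    intro hlo hhi hlen
    have hmidlen : mid < s.length := by omega
    have hklt := (hk mid hmidlen).mp hlt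
    rw [pvBl]
    simp only [dif_pos h]
    split_ifs with h2
    · exact ih (by omega) hhi hlen
    · exact absurd hlt h2
  | case2 lo hi h mid hlt ih =>
    intro hlo hhi hlen
    have hmidlen : mid < s.length := by omega
    have hk' : k ≤ mid := by
      by_contra hc
      exact hlt ((hk mid hmidlen).mpr (by omega))
    rw [pvBl]
    simp only [dif_pos h]
    split_ifs with h2
    · exact absurd h2 hlt
    · exact ih hlo hk' (by omega)
  | case3 lo hi h =>
    intro hlo hhi hlen
    rw [pvBl]
    simp only [dif_neg h]
    omega

-- pvBl on the sorted list counts the elements < v of the original list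
theorem pvBlCount (boxes : List Int) (v : Int) :
    pvBl (PySem.List.sorted boxes (fun x => x) false) v 0
        (PySem.List.sorted boxes (fun x => x) false).length
      = boxes.countP (fun b => decide (b < v)) := by
  set s := PySem.List.sorted boxes (fun x => x) false with hsdef
  have hperm : s.Perm boxes := PySem.List.sorted_perm boxes (fun x => x) false
  have hpair : List.Pairwise (· ≤ ·) s := by
    have := PySem.List.sorted_pairwise boxes (fun x => x)
    simpa [hsdef] using this
  have hcnt : s.countP (fun b => decide (b < v)) = boxes.countP (fun b => decide (b < v)) :=
    hperm.countP_eq _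
  have hle : s.countP (fun b => decide (b < v)) ≤ s.length := List.countP_le_length
  rw [← hcnt]
  exact pvBlEq s v _ (pvSortedLtIff s v hpair) 0 s.length (Nat.zero_le _) hle le_rfl

-- count arithmetic: the middle bucket is cnt(<900) - cnt(<400), the top bucket len - cnt(<900)
theorem pvCountSplit (boxes : List Int) :
    boxes.countP (fun b => decide (b < 900))
      = boxes.countP (fun b => decide (b < 400)) + boxes.countP (fun b => decide (400 ≤ b ∧ b < 900))
    ∧ boxes.length
      = boxes.countP (fun b => decide (b < 900)) + boxes.countP (fun b => decide (900 ≤ b)) := by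
  induction boxes with
  | nil => simp
  | cons a t ih =>
    simp only [List.countP_cons, List.length_cons]
    simp only [Bool.decide_and] at ih ⊢
    by_cases h1 : a < 400
    · have h2 : a < 900 := by omega
      have h3 : ¬ (900:Int) ≤ a := by omega
      have h4 : ¬ (400:Int) ≤ a := by omega
      simp [h1, h2, h3, h4]
      omega
    · have h4 : (400:Int) ≤ a := by omega
      by_cases h3 : (900:Int) ≤ a
      · have h2 : ¬ a < 900 := by omega
        simp [h1, h2, h3, h4]
        omega
      · have h2 : a < 900 := by omega
        simp [h1, h2, h3, h4]
        omega

-- the two rounding primitives agree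
theorem pvRne2_eq_rneDiv (a b : Nat) (hb : 0 < b) : pvRne2 a b = pvRneDiv a b := by
  unfold pvRne2 pvRneDiv
  have hdm := Nat.div_add_mod a b
  set q := a / b with hq
  set r := a % b with hr
  have hrb : r < b := Nat.mod_lt a hb
  have h2a : 2 * a + b = 2 * b * q + (2 * r + b) := by rw [← hdm]; ring
  have hdiv : (2 * a + b) / (2 * b) = q + (2 * r + b) / (2 * b) := by
    rw [h2a, Nat.mul_add_div (by omega)]
  by_cases hcase : b ≤ 2 * r
  · have h1 : (2 * r + b) / (2 * b) = 1 := by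
      apply Nat.div_eq_of_lt_le <;> omega
    rw [hdiv, h1]
    by_cases htie : 2 * r = b
    · have hgt : ¬ (2 * r > b) := by omega
      have hlt : ¬ (2 * r < b) := by omega
      simp only [htie, lt_irrefl, gt_iff_lt, if_false, true_and]
      by_cases hqe : q % 2 = 0
      · have : (q + 1) % 2 = 1 := by omega
        simp [this, hqe]
      · have : ¬ ((q + 1) % 2 = 1) := by omega
        simp [this, hqe]
    · have hgt : 2 * r > b := by omega
      simp [hgt, htie]
  · have h0 : (2 * r + b) / (2 * b) = 0 := Nat.div_eq_of_lt (by omega)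
    rw [hdiv, h0]
    have hgt : ¬ (2 * r > b) := by omega
    have hlt : 2 * r < b := by omega
    simp only [hgt, hlt, if_false, if_true]
    have hne : ¬ (2 * r = b ∧ (q + 0) % 2 = 1) := by omega
    rw [if_neg hne]
    omega

-- the shift rounding is division by a power of two
theorem pvRneShift_eq (x k : Nat) : pvRneShift x k = pvRneDiv x (2 ^ k) := by
  unfold pvRneShift pvRneDiv
  by_cases hk : k = 0
  · subst hk
    simp [Nat.mod_one]
  · simp only [hk, if_false]
    have hpow : 2 ^ k = 2 * 2 ^ (k - 1) := by
      rw [← pow_succ']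
      congr 1
      omega
    have hh : x % 2 ^ k < 2 ^ k := Nat.mod_lt x (Nat.pow_pos (show 0<2 by omega))
    set r := x % 2 ^ k
    have h1 : (r > 2 ^ (k - 1)) ↔ (2 * r > 2 ^ k) := by omega
    have h2 : (r < 2 ^ (k - 1)) ↔ (2 * r < 2 ^ k) := by omega
    by_cases hc1 : 2 * r > 2 ^ k
    · simp [h1, h2, hc1]
    · by_cases hc2 : 2 * r < 2 ^ k
      · simp [h1, h2, hc1, hc2]
      · simp [h1, h2, hc1, hc2]

-- pvFindD is characterised as the least d with n ≤ c * 2^d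
theorem pvFindD_char (d : Nat) : ∀ c n : Nat, 0 < c → n ≤ c * 2 ^ d →
    (d = 0 ∨ c * 2 ^ (d - 1) < n) → pvFindD c n = d := by
  induction d with
  | zero =>
    intro c n hc hle _
    rw [pvFindD]
    simp only [pow_zero, mul_one] at hle
    simp [hc.ne', hle]
  | succ d' ih =>
    intro c n hc hle hlt
    have hlt' : c * 2 ^ d' < n := by
      rcases hlt with h | h
      · omega
      · simpa using h
    have hnc : ¬ (c = 0 ∨ n ≤ c) := by
      have : c ≤ c * 2 ^ d' := Nat.le_mul_of_pos_right c (Nat.pow_pos (show 0<2 by omega))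
      omega
    rw [pvFindD]
    simp only [hnc, dif_neg, not_false_iff]
    have h1 : n ≤ 2 * c * 2 ^ d' := by
      have : c * 2 ^ (d' + 1) = 2 * c * 2 ^ d' := by ring
      omega
    have h2 : d' = 0 ∨ 2 * c * 2 ^ (d' - 1) < n := by
      by_cases hd0 : d' = 0
      · left; exact hd0
      · right
        have h3 : 2 * c * 2 ^ (d' - 1) = c * 2 ^ (d' - 1 + 1) := by
          rw [pow_succ]; ring
        have h4 : d' - 1 + 1 = d' := by omega
        rw [h4] at h3
        omega
    rw [ih (2 * c) n (by omega) h1 h2]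
    omega

-- bit-length facts
theorem pvLog2_bounds (n : Nat) (hn : 0 < n) : 2 ^ Nat.log2 n ≤ n ∧ n < 2 ^ (Nat.log2 n + 1) := by
  constructor
  · exact Nat.log2_self_le hn.ne'
  · exact Nat.lt_log2_self

-- B's bit-length formula computes pvFindD
theorem pvD_eq (c n : Nat) (hc : 0 < c) (hcn : c ≤ n) :
    (if n ≤ c * 2 ^ ((Nat.log2 n + 1) - (Nat.log2 c + 1)) then (Nat.log2 n + 1) - (Nat.log2 c + 1)
     else (Nat.log2 n + 1) - (Nat.log2 c + 1) + 1) = pvFindD c n := by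
  have hn : 0 < n := lt_of_lt_of_le hc hcn
  obtain ⟨hc1, hc2⟩ := pvLog2_bounds c hc
  obtain ⟨hn1, hn2⟩ := pvLog2_bounds n hn
  have hmono : Nat.log2 c ≤ Nat.log2 n := by
    by_contra hlt
    have hlt : Nat.log2 n < Nat.log2 c := by omega
    have : 2 ^ (Nat.log2 n + 1) ≤ 2 ^ Nat.log2 c := Nat.pow_le_pow_right (by omega) (by omega)
    omega
  set k := Nat.log2 n - Nat.log2 c with hk
  have hks : (Nat.log2 n + 1) - (Nat.log2 c + 1) = k := by omega
  rw [hks]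
  by_cases hcase : n ≤ c * 2 ^ k
  · rw [if_pos hcase]
    symm
    apply pvFindD_char k c n hc hcase
    by_cases hk0 : k = 0
    · left; exact hk0
    · right
      have h1 : c * 2 ^ (k - 1) < 2 ^ (Nat.log2 c + 1) * 2 ^ (k - 1) :=
        (Nat.mul_lt_mul_right (Nat.pow_pos (show 0<2 by omega))).mpr hc2
      have h2 : 2 ^ (Nat.log2 c + 1) * 2 ^ (k - 1) = 2 ^ Nat.log2 n := by
        rw [← pow_add]
        congr 1
        omega
      omega
  · rw [if_neg hcase]
    symm
    apply pvFindD_char (k + 1) c n hc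
    · have h1 : 2 ^ Nat.log2 c * 2 ^ (k + 1) ≤ c * 2 ^ (k + 1) :=
        Nat.mul_le_mul_right _ hc1
      have h2 : 2 ^ Nat.log2 c * 2 ^ (k + 1) = 2 ^ (Nat.log2 n + 1) := by
        rw [← pow_add]
        congr 1
        omega
      omega
    · right
      simpa using hcase
  
-- the two exact float models agree on the counters the ports feed them
theorem pvPct2_eq_pvPct (c n : Int) (hc : 0 ≤ c) (hcn : c ≤ n) (hn : 0 < n) :
    pvPct2 c n = pvPct c n := by
  unfold pvPct2 pvPct
  by_cases hc0 : c.toNat = 0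
  · simp [hc0]
  · simp only [hc0, if_false]
    have hcpos : 0 < c.toNat := by omega
    have hcn' : c.toNat ≤ n.toNat := by omega
    have hnpos : 0 < n.toNat := by omega
    rw [pvD_eq c.toNat n.toNat hcpos hcn']
    rw [pvRne2_eq_rneDiv _ _ hnpos]
    rw [pvRne2_eq_rneDiv _ _ (Nat.pow_pos (show 0<2 by omega)), ← pvRneShift_eq]
    set d := pvFindD c.toNat n.toNat
    set m1 := pvRneDiv (c.toNat * 2 ^ (52 + d)) n.toNat
    set x := m1 * 100
    set L := Nat.log2 x + 1
    set m2 := pvRneShift x (L - 53)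
    by_cases he : 105 + d ≤ L
    · have he' : (0:Int) ≤ (L : Int) - 53 - 52 - (d : Int) := by omega
      rw [if_pos he, if_pos he']
      have : ((L : Int) - 53 - 52 - (d : Int)).toNat = L - 105 - d := by omega
      rw [this]
      push_cast
      ring
    · have he' : ¬ ((0:Int) ≤ (L : Int) - 53 - 52 - (d : Int)) := by omega
      rw [if_neg he, if_neg he']
      have : (-((L : Int) - 53 - 52 - (d : Int))).toNat = 105 + d - L := by omega
      rw [this]

-- ===== VERDICT (by name: the statement is the Claim_ definition above) =====
theorem getMaterialPercentage_spec : Claim_equal_getMaterialPercentage := by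
  intro boxes _ hne
  unfold Spec_getMaterialPercentage getMaterialPercentage getMaterialPercentage_alt
  rcases pvCountSplit boxes with ⟨h9, hlen⟩
  have hlenpos : 0 < boxes.length := List.length_pos_iff.mpr hne
  have hb4 : boxes.countP (fun b => decide (b < 400)) ≤ boxes.length := List.countP_le_length
  have hb9 : boxes.countP (fun b => decide (b < 900)) ≤ boxes.length := List.countP_le_length
  simp only [pvFoldA, pvBlCount, Prod.mk.injEq, zero_add]
  refine ⟨?_, ?_, ?_⟩
  · rw [pvPct2_eq_pvPct] <;> push_cast <;> omega
  · rw [pvPct2_eq_pvPct] <;> push_cast <;> [skip; omega; omega; omega]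
    congr 1
    omega
  · rw [pvPct2_eq_pvPct] <;> push_cast <;> [skip; omega; omega; omega]
    congr 1
    omega
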